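-- pv_equiv track=rewrite | github.com/teaishealthy/aoc25 | days/1/main.py | part_two
-- ===== SOURCE A (Python) =====
-- def zeros(position: int, step: int, k: int) -> int:
--     normalized_position = (-position * step) % 100
--     if normalized_position == 0:
--         normalized_position = 100
--     if normalized_position > k:
--         return 0
--     return 1 + (k - normalized_position) // 100
--
-- def part_two(data: list[tuple[str, int]]) -> int:
--     count = 0
--     position = 50
--     for direction, k in data:
--         step = 1 if direction == "R" else -1
--         count += zeros(position, step, k)
--         position = (position + step * k) % 100
--
--     return count
-- ===== SOURCE B (Python) =====
-- def part_two(data: list[tuple[str, int]]) -> int: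
--     count = 0
--     position = 50
--     for direction, k in data:
--         step = 1 if direction == "R" else -1
--         if k > 0:
--             count += k // 100          # each full lap crosses zero exactly once
--             for _ in range(k % 100):   # walk the remaining partial lap step by step
--                 position = (position + step) % 100
--                 if position == 0:
--                     count += 1
--         else:
--             position = (position + step * k) % 100
--     return count
-- ===== Notes on version B (the rewrite author's own statement) =====
-- stated objective: alternative
-- what changed: Replaces A's closed-form zeros() arithmetic with lap counting (k // 100 full laps each cross zero once) plus a direct step-by-step simulation of the remaining k % 100 steps, moving before testing.
import Mathlib
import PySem

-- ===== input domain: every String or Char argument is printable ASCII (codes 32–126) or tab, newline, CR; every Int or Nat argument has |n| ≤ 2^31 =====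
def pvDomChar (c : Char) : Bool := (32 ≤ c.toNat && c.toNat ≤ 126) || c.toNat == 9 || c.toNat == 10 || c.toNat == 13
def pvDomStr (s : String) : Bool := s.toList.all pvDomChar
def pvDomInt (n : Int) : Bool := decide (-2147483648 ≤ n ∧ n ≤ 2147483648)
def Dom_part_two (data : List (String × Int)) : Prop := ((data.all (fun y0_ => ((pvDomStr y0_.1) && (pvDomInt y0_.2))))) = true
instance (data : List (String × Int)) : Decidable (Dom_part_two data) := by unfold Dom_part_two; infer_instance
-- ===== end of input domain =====

-- B replaces A's closed-form `zeros` helper with lap counting (k // 100) plus a direct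
-- step-by-step simulation of the remaining k % 100 steps; objective: simpler/alternative, not faster.

-- ===== PORT A =====
def zeros (position step k : Int) : Int :=
  let np0 := PySem.Int.mod (-position * step) 100
  let np := if np0 = 0 then 100 else np0
  if np > k then 0 else 1 + PySem.Int.floordiv (k - np) 100

def partTwoBody (st : Int × Int) (dk : String × Int) : Int × Int :=
  let step : Int := if dk.1 = "R" then 1 else -1
  (st.1 + zeros st.2 step dk.2, PySem.Int.mod (st.2 + step * dk.2) 100)

def part_two (data : List (String × Int)) : Int :=
  (data.foldl partTwoBody (0, 50)).1

-- ===== PORT B =====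
-- the inner `for _ in range(k % 100)` loop: state = (count, position)
def walkRem (step : Int) : Nat → Int × Int → Int × Int
  | 0, st => st
  | n + 1, st =>
    let position := PySem.Int.mod (st.2 + step) 100
    let count := if position = 0 then st.1 + 1 else st.1
    walkRem step n (count, position)

def partTwoAltBody (st : Int × Int) (dk : String × Int) : Int × Int :=
  let step : Int := if dk.1 = "R" then 1 else -1
  if dk.2 > 0 then
    walkRem step (PySem.Int.mod dk.2 100).toNat (st.1 + PySem.Int.floordiv dk.2 100, st.2)
  else
    (st.1, PySem.Int.mod (st.2 + step * dk.2) 100)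

def part_two_alt (data : List (String × Int)) : Int :=
  (data.foldl partTwoAltBody (0, 50)).1

-- ===== PRECONDITION & SPEC =====
def Spec_part_two (data : List (String × Int)) (out : Int) : Prop := out = part_two_alt data
instance (data : List (String × Int)) (out : Int) : Decidable (Spec_part_two data out) := by unfold Spec_part_two; infer_instance

-- ===== CLAIM (what is proved, stated in full; the proofs are below) =====
def Claim_equal_part_two : Prop := ∀ (data : List (String × Int)), Dom_part_two data → Spec_part_two data (part_two data)

-- ===== LEMMAS AND PROOFS =====

-- index (in steps) of the first zero crossing, in [1, 100]
def npv (p step : Int) : Int :=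
  if (-p * step) % 100 = 0 then 100 else (-p * step) % 100

lemma walkRem_spec : ∀ (n : Nat), (n : Int) < 100 → ∀ (step c p : Int),
    (step = 1 ∨ step = -1) → 0 ≤ p → p < 100 →
    walkRem step n (c, p) =
      (c + (if npv p step ≤ (n : Int) then 1 else 0), (p + step * n) % 100) := by
  intro n
  induction n with
  | zero =>
    intro _ step c p hs h0 h1
    rcases hs with hs | hs <;> subst hs <;>
      simp only [walkRem, npv, Nat.cast_zero, mul_zero, add_zero, Prod.mk.injEq] <;>
      constructor <;> first | (split_ifs <;> omega) | omega
  | succ n ih =>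
    intro hn step c p hs h0 h1
    have hn' : (n : Int) < 100 := by push_cast at hn ⊢; omega
    simp only [walkRem, PySem.Int.mod_eq_emod_of_pos (a := p + step) (by norm_num : (0:Int) < 100)]
    rw [ih hn' step _ _ hs (Int.emod_nonneg _ (by norm_num)) (Int.emod_lt_of_pos _ (by norm_num))]
    simp only [npv, Prod.mk.injEq]
    rcases hs with hs | hs <;> subst hs <;> constructor <;> push_cast <;> first | (split_ifs <;> omega) | omega

lemma body_eq (dk : String × Int) (c p : Int) (h0 : 0 ≤ p) (h1 : p < 100) :
    partTwoBody (c, p) dk = partTwoAltBody (c, p) dk := by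
  obtain ⟨d, k⟩ := dk
  simp only [partTwoBody, partTwoAltBody, zeros,
    PySem.Int.mod_eq_emod_of_pos (by norm_num : (0:Int) < 100),
    PySem.Int.floordiv_eq_ediv_of_pos (by norm_num : (0:Int) < 100)]
  have hs : (if d = "R" then (1:Int) else -1) = 1 ∨ (if d = "R" then (1:Int) else -1) = -1 := by
    split_ifs <;> simp
  set step := if d = "R" then (1:Int) else -1 with hstep
  by_cases hk : k > 0
  · rw [if_pos hk,
      walkRem_spec (k % 100).toNat
        (by rw [Int.toNat_of_nonneg (Int.emod_nonneg _ (by norm_num))]; omega)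
        step _ p hs h0 h1]
    rw [Int.toNat_of_nonneg (Int.emod_nonneg _ (by norm_num))]
    simp only [npv, Prod.mk.injEq]
    rcases hs with hs | hs <;> rw [hs] <;> constructor <;> first | (split_ifs <;> omega) | omega
  · rw [if_neg hk]
    simp only [Prod.mk.injEq]
    rcases hs with hs | hs <;> rw [hs] <;> refine ⟨?_, trivial⟩ <;> split_ifs <;> omega

lemma body_snd_bounds (st : Int × Int) (dk : String × Int) :
    0 ≤ (partTwoBody st dk).2 ∧ (partTwoBody st dk).2 < 100 := by
  simp only [partTwoBody, PySem.Int.mod_eq_emod_of_pos (by norm_num : (0:Int) < 100)]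
  exact ⟨Int.emod_nonneg _ (by norm_num), Int.emod_lt_of_pos _ (by norm_num)⟩

lemma fold_eq : ∀ (data : List (String × Int)) (c p : Int), 0 ≤ p → p < 100 →
    List.foldl partTwoBody (c, p) data = List.foldl partTwoAltBody (c, p) data := by
  intro data
  induction data with
  | nil => intro c p _ _; rfl
  | cons hd tl ih =>
    intro c p h0 h1
    have hb := body_snd_bounds (c, p) hd
    rcases h : partTwoBody (c, p) hd with ⟨c', p'⟩
    rw [h] at hb
    rw [List.foldl_cons, List.foldl_cons, ← body_eq hd c p h0 h1, h]
    exact ih c' p' hb.1 hb.2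

-- ===== VERDICT (by name: the statement is the Claim_ definition above) =====
theorem part_two_spec : Claim_equal_part_two := by
  intro data _
  unfold Spec_part_two part_two part_two_alt
  rw [fold_eq data 0 50 (by norm_num) (by norm_num)]
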